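-- pv_equiv track=rewrite | github.com/AdityaJain1030/K4-free-graph-constructions | scripts/verify_p17_lift.py | _apply_unit_to_bitmask
-- ===== SOURCE A (Python) =====
-- def _apply_unit_to_bitmask(mask: int, u: int, n: int) -> int:
--     """Return bitmask of { (u*s) mod n : s ∈ S } given S's bitmask."""
--     out = 0
--     x = mask
--     s = 0
--     while x:
--         if x & 1:
--             out |= 1 << ((u * s) % n)
--         x >>= 1
--         s += 1
--     return out
-- ===== SOURCE B (Python) =====
-- def _apply_unit_to_bitmask(mask: int, u: int, n: int) -> int:
--     """Return bitmask of { (u*s) mod n : s in S } given S's bitmask."""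
--     out = 0
--     x = mask
--     while x:
--         x2 = x & (x - 1)                  # clear the lowest set bit
--         s = (x ^ x2).bit_length() - 1     # position of that bit
--         out |= 1 << ((u * s) % n)
--         x = x2
--     return out
-- ===== Notes on version B (the rewrite author's own statement) =====
-- stated objective: alternative
-- what changed: Replaces the position-counter loop over every bit position (shift right by one, test x & 1 each step) by the low-bit trick: each iteration isolates the lowest set bit via x & (x-1), reads its position with bit_length, and clears it, so only set bits are touched and the counter disappears.
import Mathlib
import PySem

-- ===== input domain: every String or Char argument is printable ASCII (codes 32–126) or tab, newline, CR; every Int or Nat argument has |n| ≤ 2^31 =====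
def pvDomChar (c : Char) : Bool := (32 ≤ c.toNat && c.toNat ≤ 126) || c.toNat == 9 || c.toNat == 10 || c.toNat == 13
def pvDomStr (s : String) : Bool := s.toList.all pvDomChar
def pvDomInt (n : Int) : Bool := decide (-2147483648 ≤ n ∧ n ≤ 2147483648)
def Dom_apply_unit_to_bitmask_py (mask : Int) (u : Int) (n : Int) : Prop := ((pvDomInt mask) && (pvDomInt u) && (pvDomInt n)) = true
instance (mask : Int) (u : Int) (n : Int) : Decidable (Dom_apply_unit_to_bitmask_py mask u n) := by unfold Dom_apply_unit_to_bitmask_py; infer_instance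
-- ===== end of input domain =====

-- B replaces A's per-position counter loop by the low-bit trick (x & (x-1) clears, bit_length
-- locates, only set bits are visited): an alternative traversal of the same set bits.


-- ===== PORT A =====
-- A's loop state x is held as a Nat (mask.toNat): exact for 0 ≤ mask, which Pre_ requires
-- (for mask < 0 the Python loop never terminates).  `x & 1` → x &&& 1, `x >>= 1` → x >>> 1,
-- `1 << ((u*s) % n)` → 1 <<< (PySem.Int.mod (u*s) n).toNat (exact when the shift amount is
-- nonnegative, which Pre_ requires; Python raises otherwise).
def pvALoop (u n : Int) (x s out : Nat) : Nat :=
  if h : x = 0 then out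
  else pvALoop u n (x >>> 1) (s + 1)
        (if x &&& 1 = 1 then out ||| (1 <<< (PySem.Int.mod (u * (s : Int)) n).toNat) else out)
  termination_by x
  decreasing_by
    simp only [Nat.shiftRight_one]
    exact Nat.div_lt_self (Nat.pos_of_ne_zero h) one_lt_two

def apply_unit_to_bitmask_py (mask : Int) (u : Int) (n : Int) : Int :=
  (pvALoop u n mask.toNat 0 0 : Int)

-- ===== PORT B =====
-- same representation remarks as for A; `(x ^ x2).bit_length() - 1` → PySem.Int.bitLength … - 1
def pvBLoop (u n : Int) (x out : Nat) : Nat :=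
  if h : x = 0 then out
  else
    let x2 := x &&& (x - 1)
    let s := PySem.Int.bitLength ((x ^^^ x2 : Nat) : Int) - 1
    pvBLoop u n x2 (out ||| (1 <<< (PySem.Int.mod (u * (s : Int)) n).toNat))
  termination_by x
  decreasing_by
    have : x &&& (x - 1) ≤ x - 1 := Nat.and_le_right
    omega

def apply_unit_to_bitmask_py_alt (mask : Int) (u : Int) (n : Int) : Int :=
  (pvBLoop u n mask.toNat 0 : Int)

-- ===== PRECONDITION & SPEC =====
-- Pre_ admits exactly the inputs on which Python A returns: mask ≥ 0 (for mask < 0 the loop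
-- `while x: x >>= 1` never terminates), and for every set bit s of mask the shift amount
-- (u*s) % n is defined (n ≠ 0, else ZeroDivisionError) and nonnegative (else `1 << negative`
-- raises ValueError; for n > 0 this holds automatically).
def Pre_apply_unit_to_bitmask_py (mask : Int) (u : Int) (n : Int) : Prop :=
  0 ≤ mask ∧ (mask = 0 ∨ (n ≠ 0 ∧
    ∀ s, s < PySem.Int.bitLength mask → mask.toNat.testBit s = true → 0 ≤ PySem.Int.mod (u * (s : Int)) n))
instance (mask : Int) (u : Int) (n : Int) : Decidable (Pre_apply_unit_to_bitmask_py mask u n) := by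
  unfold Pre_apply_unit_to_bitmask_py; infer_instance

def pvWitness_apply_unit_to_bitmask_py : Int × Int × Int := (5, 3, 7)

def Spec_apply_unit_to_bitmask_py (mask : Int) (u : Int) (n : Int) (out : Int) : Prop := out = apply_unit_to_bitmask_py_alt mask u n
instance (mask : Int) (u : Int) (n : Int) (out : Int) : Decidable (Spec_apply_unit_to_bitmask_py mask u n out) := by unfold Spec_apply_unit_to_bitmask_py; infer_instance

-- ===== CLAIM (what is proved, stated in full; the proofs are below) =====
def Claim_equal_apply_unit_to_bitmask_py : Prop := ∀ (mask : Int) (u : Int) (n : Int), Dom_apply_unit_to_bitmask_py mask u n → Pre_apply_unit_to_bitmask_py mask u n → Spec_apply_unit_to_bitmask_py mask u n (apply_unit_to_bitmask_py mask u n)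

-- ===== LEMMAS AND PROOFS =====

-- the contribution of one set bit at absolute position s
def pvStep (u n : Int) (s : Nat) : Nat := 1 <<< (PySem.Int.mod (u * (s : Int)) n).toNat

-- canonical value of both loops: OR of pvStep over the set bits of x, offset by j
def pvF (u n : Int) (x j : Nat) : Nat :=
  if h : x = 0 then 0
  else (if x &&& 1 = 1 then pvStep u n j else 0) ||| pvF u n (x >>> 1) (j + 1)
  termination_by x
  decreasing_by
    simp only [Nat.shiftRight_one]
    exact Nat.div_lt_self (Nat.pos_of_ne_zero h) one_lt_two

theorem pvF_zero (u n : Int) (j : Nat) : pvF u n 0 j = 0 := by rw [pvF]; simp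

theorem pvF_odd (u n : Int) (a j : Nat) :
    pvF u n (2 * a + 1) j = pvStep u n j ||| pvF u n a (j + 1) := by
  rw [pvF]
  have h1 : (2 * a + 1) &&& 1 = 1 := by rw [Nat.and_one_is_mod]; omega
  have h2 : (2 * a + 1) >>> 1 = a := by rw [Nat.shiftRight_one]; omega
  simp [h1, h2]

theorem pvF_even (u n : Int) (a j : Nat) : pvF u n (2 * a) j = pvF u n a (j + 1) := by
  by_cases ha : a = 0
  · subst ha; rw [pvF_zero, pvF_zero]
  · rw [pvF]
    have h1 : (2 * a) &&& 1 = 0 := by rw [Nat.and_one_is_mod]; omega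
    have h2 : (2 * a) >>> 1 = a := by rw [Nat.shiftRight_one]; omega
    simp [h1, h2]
    omega

-- bit identities used by the low-bit characterisation
theorem pv_land_odd (a : Nat) : (2 * a + 1) &&& (2 * a) = 2 * a := by
  apply Nat.eq_of_testBit_eq
  intro i
  cases i with
  | zero => simp [Nat.testBit_zero]
  | succ i =>
      have h1 : (2 * a + 1) / 2 = a := by omega
      have h2 : (2 * a) / 2 = a := by omega
      simp [Nat.testBit_succ, Nat.and_div_two, h1, h2]

theorem pv_land_even (a : Nat) :
    (2 * a) &&& (2 * a - 1) = 2 * (a &&& (a - 1)) := by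
  apply Nat.eq_of_testBit_eq
  intro i
  cases i with
  | zero =>
      simp [Nat.testBit_zero]
  | succ i =>
      have h1 : (2 * a) / 2 = a := by omega
      have h2 : (2 * a - 1) / 2 = a - 1 := by omega
      have h3 : (2 * (a &&& (a - 1))) / 2 = a &&& (a - 1) := by omega
      simp [Nat.testBit_succ, Nat.and_div_two, h1, h2, h3]

theorem pv_xor_two_mul (a b : Nat) : (2 * a) ^^^ (2 * b) = 2 * (a ^^^ b) := by
  apply Nat.eq_of_testBit_eq
  intro i
  cases i with
  | zero => simp [Nat.testBit_zero]
  | succ i =>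
      have h1 : (2 * a) / 2 = a := by omega
      have h2 : (2 * b) / 2 = b := by omega
      have h3 : (2 * (a ^^^ b)) / 2 = a ^^^ b := by omega
      simp [Nat.testBit_succ, Nat.xor_div_two, h1, h2, h3]

theorem pv_xor_odd (a : Nat) : (2 * a + 1) ^^^ (2 * a) = 1 := by
  apply Nat.eq_of_testBit_eq
  intro i
  cases i with
  | zero => simp [Nat.testBit_zero]
  | succ i =>
      have h1 : (2 * a + 1) / 2 = a := by omega
      have h2 : (2 * a) / 2 = a := by omega
      simp [Nat.testBit_succ, Nat.xor_div_two, h1, h2]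

theorem pv_bl_pos (m : Nat) (hm : m ≠ 0) : 1 ≤ PySem.Int.bitLength (m : Int) := by
  rw [PySem.Int.bitLength_natCast (m := m) (Nat.pos_of_ne_zero hm)]
  omega

theorem pv_bl_two_mul (m : Nat) (hm : m ≠ 0) :
    PySem.Int.bitLength ((2 * m : Nat) : Int) = PySem.Int.bitLength (m : Int) + 1 := by
  rw [PySem.Int.bitLength_natCast (m := 2 * m) (by omega)]
  congr 2
  omega

theorem pv_bl_one : PySem.Int.bitLength ((1 : Nat) : Int) = 1 := by decide

-- A's loop accumulates pvF
theorem pvALoop_eq (u n : Int) : ∀ x s out, pvALoop u n x s out = out ||| pvF u n x s := by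
  intro x
  induction x using Nat.strong_induction_on with
  | _ x ih =>
    intro s out
    by_cases h : x = 0
    · subst h; rw [pvALoop, pvF_zero]; simp
    · rw [pvALoop, pvF]
      have hx : x >>> 1 < x := by
        rw [Nat.shiftRight_one]; exact Nat.div_lt_self (Nat.pos_of_ne_zero h) one_lt_two
      rw [dif_neg h, dif_neg h, ih _ hx]
      split_ifs with hc
      · rw [Nat.lor_assoc]; rfl
      · rw [Nat.zero_or]

-- low-bit characterisation of pvF: peeling the lowest set bit
theorem pvF_lowbit (u n : Int) : ∀ x, x ≠ 0 → ∀ j,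
    pvF u n x j =
      pvStep u n (j + (PySem.Int.bitLength ((x ^^^ (x &&& (x - 1)) : Nat) : Int) - 1)) |||
        pvF u n (x &&& (x - 1)) j := by
  intro x
  induction x using Nat.strong_induction_on with
  | _ x ih =>
    intro hx j
    rcases Nat.even_or_odd x with he | ho
    · -- x = 2*a, a ≠ 0
      obtain ⟨a, ha⟩ := he
      have ha2 : x = 2 * a := by omega
      have hane : a ≠ 0 := by omega
      subst ha2
      have hland : (2 * a) &&& (2 * a - 1) = 2 * (a &&& (a - 1)) := pv_land_even a
      have hxor : (2 * a) ^^^ (2 * (a &&& (a - 1))) = 2 * (a ^^^ (a &&& (a - 1))) :=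
        pv_xor_two_mul a (a &&& (a - 1))
      have hlt : a &&& (a - 1) < a := by
        have : a &&& (a - 1) ≤ a - 1 := Nat.and_le_right
        omega
      have hlbne : a ^^^ (a &&& (a - 1)) ≠ 0 := by
        intro hz
        exact absurd (Nat.xor_eq_zero_iff.mp hz).symm (Nat.ne_of_lt hlt)
      have hbl : PySem.Int.bitLength ((2 * (a ^^^ (a &&& (a - 1))) : Nat) : Int)
          = PySem.Int.bitLength ((a ^^^ (a &&& (a - 1)) : Nat) : Int) + 1 :=
        pv_bl_two_mul _ hlbne
      have hblpos : 1 ≤ PySem.Int.bitLength ((a ^^^ (a &&& (a - 1)) : Nat) : Int) :=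
        pv_bl_pos _ hlbne
      rw [pvF_even, ih a (by omega) hane (j + 1), hland, hxor, hbl, pvF_even]
      congr 2
      omega
    · -- x = 2*a + 1
      obtain ⟨a, ha⟩ := ho
      subst ha
      have hland : (2 * a + 1) &&& (2 * a + 1 - 1) = 2 * a := by
        have : 2 * a + 1 - 1 = 2 * a := by omega
        rw [this]; exact pv_land_odd a
      have hxor : (2 * a + 1) ^^^ (2 * a) = 1 := pv_xor_odd a
      rw [pvF_odd, hland, hxor, pv_bl_one, pvF_even]
      congr 2

-- B's loop accumulates pvF
theorem pvBLoop_eq (u n : Int) : ∀ x out, pvBLoop u n x out = out ||| pvF u n x 0 := by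
  intro x
  induction x using Nat.strong_induction_on with
  | _ x ih =>
    intro out
    by_cases h : x = 0
    · subst h; rw [pvBLoop, pvF_zero]; simp
    · rw [pvBLoop, dif_neg h]
      have hlt : x &&& (x - 1) < x := by
        have : x &&& (x - 1) ≤ x - 1 := Nat.and_le_right
        omega
      rw [ih _ hlt, pvF_lowbit u n x h 0, Nat.lor_assoc]
      simp [pvStep]

-- ===== VERDICT (by name: the statement is the Claim_ definition above) =====
theorem apply_unit_to_bitmask_py_spec : Claim_equal_apply_unit_to_bitmask_py := by
  intro mask u n _ _
  unfold Spec_apply_unit_to_bitmask_py apply_unit_to_bitmask_py apply_unit_to_bitmask_py_alt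
  rw [pvALoop_eq, pvBLoop_eq]
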